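-- pv_equiv track=rewrite | github.com/SergeyGris/GeekBrains_Algorithms | Урок 1. Практическое задание/task_3.py | sort_func1
-- ===== SOURCE A (Python) =====
-- def sort_func1(lst):  # Сложность: O(n^2)
--     for i in range(len(lst)):  # O(n)
--         num_idx = i
--         for j in range(i + 1, len(lst)):  # O(n)
--             if lst[j] < lst[num_idx]:  # O(1)
--                 num_idx = j  # O(1)
--         lst[i], lst[num_idx] = lst[num_idx], lst[i]  # O(1)
--     return lst[0:3]  # O(1)
-- ===== SOURCE B (Python) =====
-- def sort_func1(lst):
--     lst.sort()
--     return lst[0:3]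
-- ===== Notes on version B (the rewrite author's own statement) =====
-- stated objective: idiomatic
-- what changed: B replaces the hand-written O(n^2) selection sort (nested index loops with swaps) with the built-in in-place lst.sort() followed by the same slice.
import Mathlib
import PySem

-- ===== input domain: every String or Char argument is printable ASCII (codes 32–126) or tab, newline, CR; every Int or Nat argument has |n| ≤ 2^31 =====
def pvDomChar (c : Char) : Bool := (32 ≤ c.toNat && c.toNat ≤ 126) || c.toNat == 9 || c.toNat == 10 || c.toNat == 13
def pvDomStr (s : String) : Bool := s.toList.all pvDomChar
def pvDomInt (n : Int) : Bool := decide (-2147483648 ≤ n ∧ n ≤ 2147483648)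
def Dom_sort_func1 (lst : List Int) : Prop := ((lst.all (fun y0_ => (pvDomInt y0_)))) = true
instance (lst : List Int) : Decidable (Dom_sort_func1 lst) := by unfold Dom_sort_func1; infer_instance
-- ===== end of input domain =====

-- B replaces A's hand-written selection sort by the built-in in-place sort plus the same
-- slice; both fully sort lst in place (the proved equivalence is about the return value).

-- ===== PORT A =====
-- inner loop: for j in range(i+1, len(lst)): if lst[j] < lst[num_idx]: num_idx = j
def pvInner (acc : List Int) (i : Nat) : Nat :=
  (List.range' (i+1) (acc.length - (i+1))).foldl
    (fun ni j => if acc.getD j 0 < acc.getD ni 0 then j else ni) i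

-- one outer-loop body: find num_idx, then lst[i], lst[num_idx] = lst[num_idx], lst[i]
def pvStep (acc : List Int) (i : Nat) : List Int :=
  let numIdx := pvInner acc i
  let t0 := acc.getD numIdx 0
  let t1 := acc.getD i 0
  (acc.set i t0).set numIdx t1

def sort_func1 (lst : List Int) : List Int :=
  PySem.List.slice ((List.range lst.length).foldl pvStep lst) (some 0) (some 3)

-- ===== PORT B =====
def sort_func1_alt (lst : List Int) : List Int :=
  PySem.List.slice (PySem.List.sorted lst (fun x => x) false) none (some 3)

-- ===== PRECONDITION & SPEC =====
def Spec_sort_func1 (lst : List Int) (out : List Int) : Prop := out = sort_func1_alt lst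
instance (lst : List Int) (out : List Int) : Decidable (Spec_sort_func1 lst out) := by unfold Spec_sort_func1; infer_instance

-- ===== CLAIM (what is proved, stated in full; the proofs are below) =====
def Claim_equal_sort_func1 : Prop := ∀ (lst : List Int), Dom_sort_func1 lst → Spec_sort_func1 lst (sort_func1 lst)

-- ===== LEMMAS AND PROOFS =====

-- the inner scan returns an index that is the start or lies in the scanned range,
-- and whose element is minimal among the start's and the scanned ones
lemma pvInner_gen (acc : List Int) (js : List Nat) (ni : Nat) :
    ((js.foldl (fun ni j => if acc.getD j 0 < acc.getD ni 0 then j else ni) ni) = ni ∨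
      (js.foldl (fun ni j => if acc.getD j 0 < acc.getD ni 0 then j else ni) ni) ∈ js) ∧
    acc.getD (js.foldl (fun ni j => if acc.getD j 0 < acc.getD ni 0 then j else ni) ni) 0 ≤ acc.getD ni 0 ∧
    ∀ j ∈ js, acc.getD (js.foldl (fun ni j => if acc.getD j 0 < acc.getD ni 0 then j else ni) ni) 0 ≤ acc.getD j 0 := by
  induction js generalizing ni with
  | nil => simp
  | cons j t ih =>
    simp only [List.foldl_cons]
    obtain ⟨hmem, hle, hall⟩ := ih (if acc.getD j 0 < acc.getD ni 0 then j else ni)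
    by_cases h : acc.getD j 0 < acc.getD ni 0
    · simp only [if_pos h] at hmem hle hall ⊢
      refine ⟨?_, le_trans hle (le_of_lt h), ?_⟩
      · rcases hmem with h1 | h1
        · exact Or.inr (by rw [h1]; exact List.mem_cons_self)
        · exact Or.inr (List.mem_cons_of_mem _ h1)
      · intro j' hj'
        rcases List.mem_cons.mp hj' with rfl | hj'
        · exact hle
        · exact hall _ hj'
    · simp only [if_neg h] at hmem hle hall ⊢
      refine ⟨?_, hle, ?_⟩
      · rcases hmem with h1 | h1
        · exact Or.inl h1
        · exact Or.inr (List.mem_cons_of_mem _ h1)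
      · intro j' hj'
        rcases List.mem_cons.mp hj' with rfl | hj'
        · exact le_trans hle (not_lt.mp h)
        · exact hall _ hj'

lemma pvInner_spec (acc : List Int) (i : Nat) (hi : i < acc.length) :
    i ≤ pvInner acc i ∧ pvInner acc i < acc.length ∧
    ∀ k, i ≤ k → k < acc.length → acc.getD (pvInner acc i) 0 ≤ acc.getD k 0 := by
  unfold pvInner
  obtain ⟨hmem, hle, hall⟩ := pvInner_gen acc (List.range' (i+1) (acc.length - (i+1))) i
  have hrange : ∀ x ∈ List.range' (i+1) (acc.length - (i+1)), i + 1 ≤ x ∧ x < acc.length := by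
    intro x hx
    have := List.mem_range'_1.mp hx
    omega
  refine ⟨?_, ?_, ?_⟩
  · rcases hmem with h | h
    · omega
    · have := (hrange _ h).1; omega
  · rcases hmem with h | h
    · omega
    · exact (hrange _ h).2
  · intro k hk1 hk2
    rcases Nat.eq_or_lt_of_le hk1 with rfl | hk
    · exact hle
    · exact hall k (List.mem_range'_1.mpr (by omega))

-- prefix of indices < s untouched by sets at indices ≥ s
lemma take_set_of_le (l : List Int) (i : Nat) (v : Int) (s : Nat) (h : s ≤ i) :
    (l.set i v).take s = l.take s := by
  apply List.ext_getElem
  · simp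
  · intro n h1 h2
    simp only [List.getElem_take, List.getElem_set]
    rw [if_neg (by simp at h1; omega)]

-- the outer selection-sort loop, started at position s with a sorted, dominated prefix,
-- returns a sorted permutation that keeps that prefix
lemma pvOuter_spec : ∀ (k s : Nat) (acc : List Int),
    s + k = acc.length →
    (acc.take s).Pairwise (· ≤ ·) →
    (∀ x ∈ acc.take s, ∀ y ∈ acc.drop s, x ≤ y) →
    ((List.range' s k).foldl pvStep acc).Perm acc ∧
    ((List.range' s k).foldl pvStep acc).Pairwise (· ≤ ·) ∧
    ((List.range' s k).foldl pvStep acc).take s = acc.take s := by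
  intro k
  induction k with
  | zero =>
    intro s acc hlen h1 _
    have hs : s = acc.length := by omega
    rw [List.range'_zero, List.foldl_nil]
    refine ⟨List.Perm.refl _, ?_, rfl⟩
    rwa [hs, List.take_length] at h1
  | succ k ih =>
    intro s acc hlen h1 h2
    have hs : s < acc.length := by omega
    obtain ⟨hm1, hm2, hmin⟩ := pvInner_spec acc s hs
    generalize hm : pvInner acc s = m at hm1 hm2 hmin
    have hstep : pvStep acc s = (acc.set s acc[m]).set m acc[s] := by
      simp only [pvStep, hm]
      rw [List.getD_eq_getElem _ 0 hm2, List.getD_eq_getElem _ 0 hs]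
    have hperm' : (pvStep acc s).Perm acc := by
      rw [hstep]; exact List.set_set_perm hs hm2
    have hlen' : (pvStep acc s).length = acc.length := hperm'.length_eq
    have htake' : (pvStep acc s).take s = acc.take s := by
      rw [hstep, take_set_of_le _ _ _ _ hm1, take_set_of_le _ _ _ _ (le_refl s)]
    have hget_s : (pvStep acc s)[s]? = some acc[m] := by
      rw [hstep]
      by_cases hms : m = s
      · subst hms
        rw [List.getElem?_set_self (by simpa using hs)]
      · rw [List.getElem?_set_ne hms, List.getElem?_set_self (by simpa using hs)]
    have htake1 : (pvStep acc s).take (s+1) = acc.take s ++ [acc[m]] := by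
      rw [List.take_add_one, htake', hget_s]
      rfl
    have hmem_min : acc[m] ∈ acc.drop s := by
      have h4 : (acc.drop s)[m - s]'(by simp; omega) = acc[m] := by
        rw [List.getElem_drop]
        congr 1
        omega
      rw [← h4]; exact List.getElem_mem _
    have hmin_mem : ∀ y ∈ acc.drop s, acc[m] ≤ y := by
      intro y hy
      obtain ⟨j, hj, hjy⟩ := List.mem_iff_getElem.mp hy
      have hj2 : s + j < acc.length := by simp at hj; omega
      have hj' : (acc.drop s)[j] = acc[s + j]'hj2 := List.getElem_drop ..
      have h5 := hmin (s + j) (by omega) hj2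
      rw [List.getD_eq_getElem _ 0 hm2, List.getD_eq_getElem _ 0 hj2] at h5
      rw [← hjy, hj']
      exact h5
    have hdrop' : ((pvStep acc s).drop s).Perm (acc.drop s) := by
      have h3 : ((pvStep acc s).take s ++ (pvStep acc s).drop s).Perm
          (acc.take s ++ acc.drop s) := by simpa using hperm'
      rw [htake'] at h3
      exact (List.perm_append_left_iff _).mp h3
    have hdrop_cons : (pvStep acc s).drop s = acc[m] :: (pvStep acc s).drop (s+1) := by
      rw [List.drop_eq_getElem_cons (by omega : s < (pvStep acc s).length)]
      simp only [List.cons.injEq]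
      refine ⟨?_, trivial⟩
      have h6 := hget_s
      rwa [List.getElem?_eq_getElem (by omega), Option.some.injEq] at h6
    have hsub : ∀ y ∈ (pvStep acc s).drop (s+1), y ∈ acc.drop s := by
      intro y hy
      exact hdrop'.mem_iff.mp (by rw [hdrop_cons]; exact List.mem_cons_of_mem _ hy)
    have h1' : ((pvStep acc s).take (s+1)).Pairwise (· ≤ ·) := by
      rw [htake1, List.pairwise_append]
      refine ⟨h1, by simp, ?_⟩
      intro x hx y hy
      simp only [List.mem_singleton] at hy
      subst hy
      exact h2 x hx _ hmem_min
    have h2' : ∀ x ∈ (pvStep acc s).take (s+1), ∀ y ∈ (pvStep acc s).drop (s+1), x ≤ y := by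
      intro x hx y hy
      rw [htake1] at hx
      rcases List.mem_append.mp hx with hx | hx
      · exact h2 x hx y (hsub y hy)
      · simp only [List.mem_singleton] at hx
        subst hx
        exact hmin_mem y (hsub y hy)
    obtain ⟨r1, r2, r3⟩ := ih (s+1) (pvStep acc s) (by omega) h1' h2'
    rw [List.range'_succ, List.foldl_cons]
    refine ⟨r1.trans hperm', r2, ?_⟩
    have h7 : ((List.range' (s+1) k).foldl pvStep (pvStep acc s)).take s =
        (((List.range' (s+1) k).foldl pvStep (pvStep acc s)).take (s+1)).take s := by
      rw [List.take_take]
      congr 1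
      omega
    rw [h7, r3, htake1, List.take_append_of_le_length (by rw [List.length_take]; omega),
        List.take_take]
    congr 1
    omega

-- ===== VERDICT (by name: the statement is the Claim_ definition above) =====
theorem sort_func1_spec : Claim_equal_sort_func1 := by
  intro lst _
  unfold Spec_sort_func1 sort_func1 sort_func1_alt
  obtain ⟨hperm, hpair, -⟩ := pvOuter_spec lst.length 0 lst (by omega) (by simp) (by simp)
  have hsorted : PySem.List.sorted lst (fun x => x) false =
      (List.range' 0 lst.length).foldl pvStep lst :=
    PySem.List.sorted_id_eq_of_perm_of_pairwise lst _ hperm hpair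
  rw [PySem.List.slice_zero_start, hsorted, List.range_eq_range']
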